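-- pv_equiv track=rewrite | github.com/wangqian621/X-ACE | tools/reformat_data.py | check_time_attr
-- ===== SOURCE A (Python) =====
-- TIME_REL = ["before","then","followed","followed by","later","finally","after","following","as","while","when","the same time","simultaneously"]
--
-- BeVerbs = ["be", "is", "am", "are", "was", "were", "been", "being"]
--
-- prep_word = [
--     'about', 'above', 'across', 'after', 'against', 'along', 'among', 'around',
--     'at', 'before', 'behind', 'below', 'beneath', 'beside', 'between', 'beyond',
--     'by', 'down', 'during', 'for', 'from', 'in', 'inside', 'into', 'near', 'of',
--     'on', 'onto', 'out', 'over', 'through', 'to', 'toward',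
--     'under', 'underneath', 'until', 'unto', 'up', 'upon', 'with', 'within', 'without'
-- ]
--
-- def check_time_attr(unit):
--     unit_split = unit.split(' ')
--     for word in unit_split:
--         if word in TIME_REL:
--             return True
--         if (word in prep_word or word in BeVerbs) and len(list(unit_split))<2:
--             return True
--         if word.lower() in ["null","none","false","unknown"]:
--             return True
--     return False
-- ===== SOURCE B (Python) =====
-- TIME_REL = ["before","then","followed","followed by","later","finally","after","following","as","while","when","the same time","simultaneously"]
--
-- BeVerbs = ["be", "is", "am", "are", "was", "were", "been", "being"]
--
-- prep_word = [
--     'about', 'above', 'across', 'after', 'against', 'along', 'among', 'around',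
--     'at', 'before', 'behind', 'below', 'beneath', 'beside', 'between', 'beyond',
--     'by', 'down', 'during', 'for', 'from', 'in', 'inside', 'into', 'near', 'of',
--     'on', 'onto', 'out', 'over', 'through', 'to', 'toward',
--     'under', 'underneath', 'until', 'unto', 'up', 'upon', 'with', 'within', 'without'
-- ]
--
-- def check_time_attr(unit):
--     words = unit.split(' ')
--     if set(words) & set(TIME_REL):
--         return True
--     if len(words) < 2 and set(words) & (set(prep_word) | set(BeVerbs)):
--         return True
--     return bool({w.lower() for w in words} & {"null", "none", "false", "unknown"})
-- ===== Notes on version B (the rewrite author's own statement) =====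
-- stated objective: simpler
-- what changed: Replaces the per-word sequential loop with three early returns by whole-set intersections: one set-intersection test per category, with no word-by-word scan.
import Mathlib
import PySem

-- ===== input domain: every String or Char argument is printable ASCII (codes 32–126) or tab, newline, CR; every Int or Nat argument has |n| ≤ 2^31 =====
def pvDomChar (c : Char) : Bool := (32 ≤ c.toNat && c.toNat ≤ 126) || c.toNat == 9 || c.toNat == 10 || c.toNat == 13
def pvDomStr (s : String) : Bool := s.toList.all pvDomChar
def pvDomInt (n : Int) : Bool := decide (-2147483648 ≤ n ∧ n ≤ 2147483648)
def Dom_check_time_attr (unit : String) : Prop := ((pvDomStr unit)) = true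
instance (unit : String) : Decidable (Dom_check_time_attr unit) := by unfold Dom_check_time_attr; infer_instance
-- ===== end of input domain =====

-- B replaces A's per-word loop with whole-set intersection tests (simpler decomposition, same cost class).

def TIME_REL : List String := ["before","then","followed","followed by","later","finally","after","following","as","while","when","the same time","simultaneously"]

def BeVerbs : List String := ["be", "is", "am", "are", "was", "were", "been", "being"]

def prep_word : List String :=
  ["about", "above", "across", "after", "against", "along", "among", "around",
   "at", "before", "behind", "below", "beneath", "beside", "between", "beyond",
   "by", "down", "during", "for", "from", "in", "inside", "into", "near", "of",
   "on", "onto", "out", "over", "through", "to", "toward",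
   "under", "underneath", "until", "unto", "up", "upon", "with", "within", "without"]

-- ===== PORT A =====
-- the for-loop with early returns, as structural recursion over the word list
def checkLoopA (unit_split : List String) : List String → Bool
  | [] => false
  | word :: rest =>
    if TIME_REL.contains word then true
    else if (prep_word.contains word || BeVerbs.contains word) && decide (unit_split.length < 2) then true
    else if (["null","none","false","unknown"] : List String).contains (PySem.Str.lower word) then true
    else checkLoopA unit_split rest

def check_time_attr (unit : String) : Bool :=
  let unit_split := (PySem.Str.split? unit " ").getD []
  checkLoopA unit_split unit_split

-- ===== PORT B =====
def check_time_attr_alt (unit : String) : Bool :=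
  let words := (PySem.Str.split? unit " ").getD []
  if !(PySem.Set.inter (PySem.Set.ofList words) TIME_REL).isEmpty then true
  else if decide (words.length < 2) &&
          !(PySem.Set.inter (PySem.Set.ofList words)
              (PySem.Set.union (PySem.Set.ofList prep_word) BeVerbs)).isEmpty then true
  else !(PySem.Set.inter (PySem.Set.ofList (words.map PySem.Str.lower))
          (PySem.Set.ofList ["null","none","false","unknown"])).isEmpty

-- ===== PRECONDITION & SPEC =====
def Spec_check_time_attr (unit : String) (out : Bool) : Prop := out = check_time_attr_alt unit
instance (unit : String) (out : Bool) : Decidable (Spec_check_time_attr unit out) := by unfold Spec_check_time_attr; infer_instance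

-- ===== CLAIM (what is proved, stated in full; the proofs are below) =====
def Claim_equal_check_time_attr : Prop := ∀ (unit : String), Dom_check_time_attr unit → Spec_check_time_attr unit (check_time_attr unit)

-- ===== LEMMAS AND PROOFS =====

theorem inter_ofList_not_isEmpty (xs t : List String) :
    (!(PySem.Set.inter (PySem.Set.ofList xs) t).isEmpty) = true ↔ ∃ x ∈ xs, x ∈ t := by
  simp [← List.length_pos_iff_ne_nil, List.length_pos_iff_exists_mem,
    PySem.Set.mem_inter, PySem.Set.mem_ofList]

theorem checkLoopA_true_iff (us ws : List String) :
    checkLoopA us ws = true ↔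
      ∃ w ∈ ws, w ∈ TIME_REL ∨ ((w ∈ prep_word ∨ w ∈ BeVerbs) ∧ us.length < 2) ∨
        PySem.Str.lower w ∈ (["null","none","false","unknown"] : List String) := by
  induction ws with
  | nil => simp [checkLoopA]
  | cons w rest ih =>
    simp only [checkLoopA]
    split_ifs with h1 h2 h3
    · exact iff_of_true rfl ⟨w, List.mem_cons_self, Or.inl (List.contains_iff_mem.mp h1)⟩
    · rw [Bool.and_eq_true, Bool.or_eq_true, decide_eq_true_eq] at h2
      exact iff_of_true rfl ⟨w, List.mem_cons_self,
        Or.inr (Or.inl ⟨h2.1.imp List.contains_iff_mem.mp List.contains_iff_mem.mp, h2.2⟩)⟩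
    · exact iff_of_true rfl ⟨w, List.mem_cons_self, Or.inr (Or.inr (List.contains_iff_mem.mp h3))⟩
    · rw [ih]
      constructor
      · rintro ⟨x, hx, hp⟩
        exact ⟨x, List.mem_cons_of_mem _ hx, hp⟩
      · rintro ⟨x, hx, hp⟩
        rcases List.mem_cons.mp hx with rfl | hx
        · exfalso
          rcases hp with ht | ⟨hpb, hl⟩ | hn
          · exact h1 (List.contains_iff_mem.mpr ht)
          · exact h2 (by
              rw [Bool.and_eq_true, Bool.or_eq_true, decide_eq_true_eq]
              exact ⟨hpb.imp List.contains_iff_mem.mpr List.contains_iff_mem.mpr, hl⟩)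
          · exact h3 (List.contains_iff_mem.mpr hn)
        · exact ⟨x, hx, hp⟩

theorem check_time_attr_spec : Claim_equal_check_time_attr := by
  intro unit _
  unfold Spec_check_time_attr check_time_attr check_time_attr_alt
  rw [Bool.eq_iff_iff]
  simp only [checkLoopA_true_iff]
  split_ifs with h1 h2
  · rw [inter_ofList_not_isEmpty] at h1
    simp only [iff_true]
    obtain ⟨w, hw, ht⟩ := h1
    exact ⟨w, hw, Or.inl ht⟩
  · simp only [Bool.and_eq_true, decide_eq_true_eq] at h2
    obtain ⟨hlen, h2⟩ := h2
    rw [inter_ofList_not_isEmpty] at h2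
    simp only [iff_true]
    obtain ⟨w, hw, ht⟩ := h2
    rw [PySem.Set.mem_union, PySem.Set.mem_ofList] at ht
    exact ⟨w, hw, Or.inr (Or.inl ⟨ht, hlen⟩)⟩
  · rw [Bool.not_eq_true'] at h1
    rw [inter_ofList_not_isEmpty]
    constructor
    · rintro ⟨w, hw, hc⟩
      rcases hc with ht | ⟨hp, hl⟩ | hn
      · exact absurd (inter_ofList_not_isEmpty _ _ |>.mpr ⟨w, hw, ht⟩)
          (by simp [h1])
      · exact absurd (by
          simp only [Bool.and_eq_true, decide_eq_true_eq]
          exact ⟨hl, (inter_ofList_not_isEmpty _ _).mpr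
            ⟨w, hw, by rw [PySem.Set.mem_union, PySem.Set.mem_ofList]; exact hp⟩⟩) h2
      · exact ⟨PySem.Str.lower w, List.mem_map_of_mem hw,
          by rw [PySem.Set.mem_ofList]; exact hn⟩
    · rintro ⟨x, hx, hn⟩
      obtain ⟨w, hw, rfl⟩ := List.mem_map.mp hx
      rw [PySem.Set.mem_ofList] at hn
      exact ⟨w, hw, Or.inr (Or.inr hn)⟩
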